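-- pv_equiv track=rewrite | github.com/Brown-University-Library/bdr_indexer | bdr_solrizer/indexers/relsextindexer.py | get_object_type_from_content_models
-- ===== SOURCE A (Python) =====
-- METADATA_OBJECT_TYPES = [
--     'commonMetadata',
--     'archiveMETS',
-- ]
--
-- def get_object_type_from_content_models(content_models):
--     reduced_content_models = [m for m in content_models if m not in METADATA_OBJECT_TYPES]
--     collection_cmodel = 'bdr-collection'
--     if collection_cmodel in reduced_content_models:
--         return collection_cmodel
--     for image_content_model in ['image', 'jp2', 'image-compound', 'jpg', 'png', 'masterImage']:
--         if image_content_model in reduced_content_models: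
--             return 'image'
--     if 'audioMaster' in reduced_content_models or 'mp3' in reduced_content_models:
--         return 'audio'
--     if 'mp4' in reduced_content_models or 'mov' in reduced_content_models or 'm4v' in reduced_content_models:
--         return 'video'
--     if reduced_content_models:
--         return reduced_content_models[0]
--     return 'undetermined'
-- ===== SOURCE B (Python) =====
-- def _rank(m):
--     if m == 'bdr-collection':
--         return 0
--     if m in ('image', 'jp2', 'image-compound', 'jpg', 'png', 'masterImage'):
--         return 1
--     if m in ('audioMaster', 'mp3'):
--         return 2
--     if m in ('mp4', 'mov', 'm4v'):
--         return 3
--     return 4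
--
--
-- def get_object_type_from_content_models(content_models):
--     # Single pass: keep the best (smallest) priority rank seen and the first
--     # non-metadata model as fallback, then decode the rank at the end.
--     best = 4
--     fallback = None
--     for m in content_models:
--         if m in ('commonMetadata', 'archiveMETS'):
--             continue
--         if fallback is None:
--             fallback = m
--         best = min(best, _rank(m))
--     if best < 4:
--         return ('bdr-collection', 'image', 'audio', 'video')[best]
--     return fallback if fallback is not None else 'undetermined'
-- ===== Notes on version B (the rewrite author's own statement) =====
-- stated objective: alternative
-- what changed: Replaces A's staged membership scans (a dozen 'in' tests each rescanning the filtered list) by a single left-to-right pass that maintains a minimum priority rank and the first non-metadata model, decoding the rank at the end.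
import Mathlib
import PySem

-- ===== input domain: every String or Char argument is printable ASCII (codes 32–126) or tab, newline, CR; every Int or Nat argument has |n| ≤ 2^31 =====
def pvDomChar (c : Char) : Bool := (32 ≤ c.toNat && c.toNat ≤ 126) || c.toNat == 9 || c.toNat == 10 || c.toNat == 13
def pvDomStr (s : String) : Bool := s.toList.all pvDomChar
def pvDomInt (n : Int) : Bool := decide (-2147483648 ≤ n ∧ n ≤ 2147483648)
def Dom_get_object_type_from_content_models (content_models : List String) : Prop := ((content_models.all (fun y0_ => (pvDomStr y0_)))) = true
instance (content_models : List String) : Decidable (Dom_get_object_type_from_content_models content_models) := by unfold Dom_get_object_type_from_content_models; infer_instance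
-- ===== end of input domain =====

-- B replaces A's staged membership scans by one left-to-right pass keeping a minimum
-- priority rank and the first non-metadata model, decoded at the end (objective: alternative).

-- ===== PORT A =====
def METADATA_OBJECT_TYPES : List String := ["commonMetadata", "archiveMETS"]

-- A's 'for image_content_model in [...]' loop with its early 'return' becomes an Option-returning recursion
def pvImageLoop (image_models : List String) (reduced : List String) : Option String :=
  match image_models with
  | [] => none
  | m :: rest => if reduced.contains m then some "image" else pvImageLoop rest reduced

def get_object_type_from_content_models (content_models : List String) : String :=
  let reduced := content_models.filter (fun m => !(METADATA_OBJECT_TYPES.contains m))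
  if reduced.contains "bdr-collection" then "bdr-collection"
  else
    match pvImageLoop ["image", "jp2", "image-compound", "jpg", "png", "masterImage"] reduced with
    | some s => s
    | none =>
      if reduced.contains "audioMaster" || reduced.contains "mp3" then "audio"
      else if reduced.contains "mp4" || reduced.contains "mov" || reduced.contains "m4v" then "video"
      else match reduced with
        | x :: _ => x
        | [] => "undetermined"

-- ===== PORT B =====
-- Source B's _rank: chain of equality / tuple-membership tests
def pvRank (m : String) : Nat :=
  if m = "bdr-collection" then 0
  else if (["image", "jp2", "image-compound", "jpg", "png", "masterImage"] : List String).contains m then 1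
  else if (["audioMaster", "mp3"] : List String).contains m then 2
  else if (["mp4", "mov", "m4v"] : List String).contains m then 3
  else 4

-- one iteration of Source B's loop body on the state (best, fallback)
def pvStep (s : Nat × Option String) (m : String) : Nat × Option String :=
  if (["commonMetadata", "archiveMETS"] : List String).contains m then s
  else (min s.1 (pvRank m), if s.2 = none then some m else s.2)

-- Source B's final 'return' lines: tuple indexing by best, else the fallback
def pvDecode (st : Nat × Option String) : String :=
  if st.1 < 4 then
    match st.1 with
    | 0 => "bdr-collection"
    | 1 => "image"
    | 2 => "audio"
    | _ => "video"
  else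
    match st.2 with
    | some x => x
    | none => "undetermined"

def get_object_type_from_content_models_alt (content_models : List String) : String :=
  pvDecode (content_models.foldl pvStep (4, none))

-- ===== PRECONDITION & SPEC =====
def Spec_get_object_type_from_content_models (content_models : List String) (out : String) : Prop := out = get_object_type_from_content_models_alt content_models
instance (content_models : List String) (out : String) : Decidable (Spec_get_object_type_from_content_models content_models out) := by unfold Spec_get_object_type_from_content_models; infer_instance

-- ===== CLAIM (what is proved, stated in full; the proofs are below) =====
def Claim_equal_get_object_type_from_content_models : Prop := ∀ (content_models : List String), Dom_get_object_type_from_content_models content_models → Spec_get_object_type_from_content_models content_models (get_object_type_from_content_models content_models)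

-- ===== LEMMAS AND PROOFS =====

-- skipping metadata inside the fold = folding the plain step over the filtered list
lemma fold_skip (l : List String) (s : Nat × Option String) :
    l.foldl pvStep s
  = (l.filter (fun m => !((["commonMetadata", "archiveMETS"] : List String).contains m))).foldl
      (fun (s : Nat × Option String) m =>
        (min s.1 (pvRank m), if s.2 = none then some m else s.2)) s := by
  induction l generalizing s with
  | nil => rfl
  | cons a t ih =>
    by_cases h : (["commonMetadata", "archiveMETS"] : List String).contains a = true
    · have hs : pvStep s a = s := by unfold pvStep; rw [if_pos h]
      have hnb : (!((["commonMetadata", "archiveMETS"] : List String).contains a)) = false := by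
        rw [h]; rfl
      rw [List.foldl_cons, hs, ih, List.filter_cons, hnb]
      simp only [Bool.false_eq_true, if_false]
    · have hs : pvStep s a = (min s.1 (pvRank a), if s.2 = none then some a else s.2) := by
        unfold pvStep; rw [if_neg h]
      have h' : (["commonMetadata", "archiveMETS"] : List String).contains a = false := by
        simpa using h
      have hnb : (!((["commonMetadata", "archiveMETS"] : List String).contains a)) = true := by
        rw [h']; rfl
      rw [List.foldl_cons, hs, ih, List.filter_cons, hnb, if_pos rfl, List.foldl_cons]

-- the pair fold splits into its two independent components
lemma fold_pair (l : List String) (b : Nat) (fb : Option String) :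
    l.foldl (fun (s : Nat × Option String) m =>
        (min s.1 (pvRank m), if s.2 = none then some m else s.2)) (b, fb)
  = (l.foldl (fun b m => min b (pvRank m)) b,
     l.foldl (fun fb m => if fb = none then some m else fb) fb) := by
  induction l generalizing b fb with
  | nil => rfl
  | cons a t ih => simp only [List.foldl_cons, ih]

lemma fbFold_some (l : List String) (x : String) :
    l.foldl (fun fb m => if fb = none then some m else fb) (some x) = some x := by
  induction l with
  | nil => rfl
  | cons a t ih => simpa using ih

lemma fbFold_none (l : List String) :
    l.foldl (fun fb m => if fb = none then some m else fb) none = l.head? := by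
  cases l with
  | nil => rfl
  | cons a t => simp [fbFold_some]

lemma bestFold_le (r : List String) (b k : Nat) :
    r.foldl (fun b m => min b (pvRank m)) b ≤ k ↔ b ≤ k ∨ ∃ m ∈ r, pvRank m ≤ k := by
  induction r generalizing b with
  | nil => simp
  | cons a t ih =>
    simp only [List.foldl_cons, ih, List.mem_cons]
    constructor
    · rintro (h | ⟨m, hm, hk⟩)
      · rcases Nat.le_total b (pvRank a) with h' | h'
        · left; omega
        · right; exact ⟨a, Or.inl rfl, by omega⟩
      · right; exact ⟨m, Or.inr hm, hk⟩
    · rintro (h | ⟨m, hm, hk⟩)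
      · left; omega
      · rcases hm with rfl | hm
        · left; omega
        · right; exact ⟨m, hm, hk⟩

lemma pvRank_le_zero (m : String) : pvRank m ≤ 0 ↔ m = "bdr-collection" := by
  unfold pvRank; split_ifs <;> simp_all

lemma pvRank_le_one (m : String) :
    pvRank m ≤ 1 ↔ m = "bdr-collection" ∨
      m ∈ (["image", "jp2", "image-compound", "jpg", "png", "masterImage"] : List String) := by
  unfold pvRank; split_ifs with h1 h2 <;> simp_all [List.contains_eq_mem]

lemma pvRank_le_two (m : String) :
    pvRank m ≤ 2 ↔ m = "bdr-collection" ∨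
      m ∈ (["image", "jp2", "image-compound", "jpg", "png", "masterImage"] : List String) ∨
      m ∈ (["audioMaster", "mp3"] : List String) := by
  unfold pvRank; split_ifs with h1 h2 h3 <;> simp_all [List.contains_eq_mem]

lemma pvRank_le_three (m : String) :
    pvRank m ≤ 3 ↔ m = "bdr-collection" ∨
      m ∈ (["image", "jp2", "image-compound", "jpg", "png", "masterImage"] : List String) ∨
      m ∈ (["audioMaster", "mp3"] : List String) ∨
      m ∈ (["mp4", "mov", "m4v"] : List String) := by
  unfold pvRank; split_ifs with h1 h2 h3 h4 <;> simp_all [List.contains_eq_mem]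

lemma pvImageLoop_pos (ms r : List String) (h : ∃ m ∈ ms, m ∈ r) :
    pvImageLoop ms r = some "image" := by
  induction ms with
  | nil => simp at h
  | cons a t ih =>
    rw [pvImageLoop]
    by_cases ha : r.contains a = true
    · rw [if_pos ha]
    · rw [if_neg ha]
      apply ih
      obtain ⟨m, hm, hmr⟩ := h
      rcases List.mem_cons.1 hm with rfl | hm
      · exact absurd (by simpa [List.contains_eq_mem] using hmr) ha
      · exact ⟨m, hm, hmr⟩

lemma pvImageLoop_neg (ms r : List String) (h : ∀ m ∈ ms, m ∉ r) :
    pvImageLoop ms r = none := by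
  induction ms with
  | nil => rfl
  | cons a t ih =>
    rw [pvImageLoop, if_neg, ih]
    · intro m hm; exact h m (List.mem_cons_of_mem _ hm)
    · simpa [List.contains_eq_mem] using h a (List.mem_cons_self ..)

-- ===== VERDICT (by name: the statement is the Claim_ definition above) =====
set_option maxHeartbeats 1600000 in
theorem get_object_type_from_content_models_spec : Claim_equal_get_object_type_from_content_models := by
  intro content_models _
  unfold Spec_get_object_type_from_content_models get_object_type_from_content_models
    get_object_type_from_content_models_alt
  rw [fold_skip, fold_pair, fbFold_none]
  simp only [METADATA_OBJECT_TYPES]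
  generalize (content_models.filter
      (fun m => !((["commonMetadata", "archiveMETS"] : List String).contains m))) = r
  unfold pvDecode
  by_cases h0 : "bdr-collection" ∈ r
  · have hF : r.foldl (fun b m => min b (pvRank m)) 4 = 0 := by
      have := (bestFold_le r 4 0).2 (Or.inr ⟨_, h0, by decide⟩)
      omega
    have hcol : r.contains "bdr-collection" = true := by
      simpa [List.contains_eq_mem] using h0
    rw [hcol, hF]
    simp
  · have hb0 : ¬ r.foldl (fun b m => min b (pvRank m)) 4 ≤ 0 := by
      intro h
      rcases (bestFold_le r 4 0).1 h with h | ⟨m', hm', hr⟩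
      · omega
      · exact h0 ((pvRank_le_zero m').1 hr ▸ hm')
    have hcol : r.contains "bdr-collection" = false := by
      simp [List.contains_eq_mem, h0]
    by_cases h1 : ∃ m ∈ r, m ∈ (["image", "jp2", "image-compound", "jpg", "png", "masterImage"] : List String)
    · obtain ⟨m, hm, hmem⟩ := h1
      have hF : r.foldl (fun b m => min b (pvRank m)) 4 = 1 := by
        have hub := (bestFold_le r 4 1).2 (Or.inr ⟨m, hm, (pvRank_le_one m).2 (Or.inr hmem)⟩)
        omega
      have hloop : pvImageLoop ["image", "jp2", "image-compound", "jpg", "png", "masterImage"] r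
          = some "image" := pvImageLoop_pos _ _ ⟨m, hmem, hm⟩
      rw [hcol, hloop, hF]
      simp
    · have hnone : ∀ m ∈ (["image", "jp2", "image-compound", "jpg", "png", "masterImage"] : List String), m ∉ r := by
        intro x hx hxr; exact h1 ⟨x, hxr, hx⟩
      have hloop : pvImageLoop ["image", "jp2", "image-compound", "jpg", "png", "masterImage"] r
          = none := pvImageLoop_neg _ _ hnone
      have hb1 : ¬ r.foldl (fun b m => min b (pvRank m)) 4 ≤ 1 := by
        intro h
        rcases (bestFold_le r 4 1).1 h with h | ⟨m', hm', hr⟩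
        · omega
        · rcases (pvRank_le_one m').1 hr with rfl | hmem
          · exact h0 hm'
          · exact h1 ⟨m', hm', hmem⟩
      by_cases h2 : "audioMaster" ∈ r ∨ "mp3" ∈ r
      · have hF : r.foldl (fun b m => min b (pvRank m)) 4 = 2 := by
          have hub : r.foldl (fun b m => min b (pvRank m)) 4 ≤ 2 := by
            rcases h2 with h | h
            · exact (bestFold_le r 4 2).2 (Or.inr ⟨_, h, by decide⟩)
            · exact (bestFold_le r 4 2).2 (Or.inr ⟨_, h, by decide⟩)
          omega
        have ha : (r.contains "audioMaster" || r.contains "mp3") = true := by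
          simp only [Bool.or_eq_true, List.contains_eq_mem, decide_eq_true_eq]; exact h2
        rw [hcol, hloop, ha, hF]
        simp
      · have hb2 : ¬ r.foldl (fun b m => min b (pvRank m)) 4 ≤ 2 := by
          intro h
          rcases (bestFold_le r 4 2).1 h with h | ⟨m', hm', hr⟩
          · omega
          · rcases (pvRank_le_two m').1 hr with rfl | hmem | hmem
            · exact h0 hm'
            · exact h1 ⟨m', hm', hmem⟩
            · rcases List.mem_cons.1 hmem with rfl | hmem
              · exact h2 (Or.inl hm')
              · simp only [List.mem_singleton] at hmem
                subst hmem; exact h2 (Or.inr hm')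
        have ha : (r.contains "audioMaster" || r.contains "mp3") = false := by
          simp only [Bool.or_eq_false_iff, List.contains_eq_mem, decide_eq_false_iff_not]
          exact ⟨fun h => h2 (Or.inl h), fun h => h2 (Or.inr h)⟩
        by_cases h3 : "mp4" ∈ r ∨ "mov" ∈ r ∨ "m4v" ∈ r
        · have hF : r.foldl (fun b m => min b (pvRank m)) 4 = 3 := by
            have hub : r.foldl (fun b m => min b (pvRank m)) 4 ≤ 3 := by
              rcases h3 with h | h | h
              · exact (bestFold_le r 4 3).2 (Or.inr ⟨_, h, by decide⟩)
              · exact (bestFold_le r 4 3).2 (Or.inr ⟨_, h, by decide⟩)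
              · exact (bestFold_le r 4 3).2 (Or.inr ⟨_, h, by decide⟩)
            omega
          have hv : (r.contains "mp4" || r.contains "mov" || r.contains "m4v") = true := by
            simp only [Bool.or_eq_true, List.contains_eq_mem, decide_eq_true_eq]
            tauto
          rw [hcol, hloop, ha, hv, hF]
          simp
        · have hb3 : ¬ r.foldl (fun b m => min b (pvRank m)) 4 ≤ 3 := by
            intro h
            rcases (bestFold_le r 4 3).1 h with h | ⟨m', hm', hr⟩
            · omega
            · rcases (pvRank_le_three m').1 hr with rfl | hmem | hmem | hmem
              · exact h0 hm'
              · exact h1 ⟨m', hm', hmem⟩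
              · rcases List.mem_cons.1 hmem with rfl | hmem
                · exact h2 (Or.inl hm')
                · simp only [List.mem_singleton] at hmem
                  subst hmem; exact h2 (Or.inr hm')
              · rcases List.mem_cons.1 hmem with rfl | hmem
                · exact h3 (Or.inl hm')
                · rcases List.mem_cons.1 hmem with rfl | hmem
                  · exact h3 (Or.inr (Or.inl hm'))
                  · simp only [List.mem_singleton] at hmem
                    subst hmem; exact h3 (Or.inr (Or.inr hm'))
          have hb4 : r.foldl (fun b m => min b (pvRank m)) 4 ≤ 4 :=
            (bestFold_le r 4 4).2 (Or.inl le_rfl)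
          have hF : r.foldl (fun b m => min b (pvRank m)) 4 = 4 := by omega
          have hv : (r.contains "mp4" || r.contains "mov" || r.contains "m4v") = false := by
            simp only [Bool.or_eq_false_iff, List.contains_eq_mem, decide_eq_false_iff_not]
            tauto
          rw [hcol, hloop, ha, hv, hF]
          cases r with
          | nil => simp
          | cons x t => simp
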